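-- pv_equiv track=rewrite | github.com/danielares/TwComp | myLibs/chart_generator.py | count_polarity
-- ===== SOURCE A (Python) =====
-- def count_polarity(tweets):
--     positive = 0
--     neutral = 0
--     negative = 0
--
--     for tweet in tweets:
--         if tweet['tweet_analise'] == 'positive':
--             positive += 1
--         elif tweet['tweet_analise'] == 'neutral':
--             neutral += 1
--         else:
--             negative += 1
--
--     return positive, neutral, negative
-- ===== SOURCE B (Python) =====
-- def count_polarity(tweets):
--     labels = [t['tweet_analise'] for t in tweets]
--     positive = labels.count('positive')
--     neutral = labels.count('neutral')
--     return positive, neutral, len(labels) - positive - neutral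
-- ===== Notes on version B (the rewrite author's own statement) =====
-- stated objective: idiomatic
-- what changed: B replaces A's single pass with a three-branch counter chain by staged passes: it first extracts the list of polarity labels, then obtains positive and neutral via list.count scans and recovers negative by subtraction from the total, with no per-element conditional at all.
import Mathlib
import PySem

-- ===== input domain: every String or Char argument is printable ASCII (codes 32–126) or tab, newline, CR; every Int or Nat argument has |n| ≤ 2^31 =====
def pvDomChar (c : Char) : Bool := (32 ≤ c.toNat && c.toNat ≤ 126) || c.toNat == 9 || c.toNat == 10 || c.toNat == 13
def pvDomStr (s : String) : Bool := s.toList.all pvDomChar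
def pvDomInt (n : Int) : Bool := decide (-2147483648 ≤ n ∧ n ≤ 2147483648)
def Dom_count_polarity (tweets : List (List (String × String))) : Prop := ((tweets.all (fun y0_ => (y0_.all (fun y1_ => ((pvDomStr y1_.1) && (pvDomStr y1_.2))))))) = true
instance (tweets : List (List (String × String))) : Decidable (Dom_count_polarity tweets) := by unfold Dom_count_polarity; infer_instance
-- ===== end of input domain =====

-- B: staged passes (extract labels once, then count scans; negative by subtraction) instead of A's one pass with a three-branch counter chain.
-- ===== PORT A =====
def count_polarity (tweets : List (List (String × String))) : Int × Int × Int :=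
  tweets.foldl (fun (acc : Int × Int × Int) t =>
    match (PySem.Dict.mk t).get? "tweet_analise" with
    | some v =>
      if v == "positive" then (acc.1 + 1, acc.2.1, acc.2.2)
      else if v == "neutral" then (acc.1, acc.2.1 + 1, acc.2.2)
      else (acc.1, acc.2.1, acc.2.2 + 1)
    | none => acc)  -- KeyError in Python: excluded by Pre_
    (0, 0, 0)

-- ===== PORT B =====
def count_polarity_alt (tweets : List (List (String × String))) : Int × Int × Int :=
  let labels := tweets.map (fun t => ((PySem.Dict.mk t).get? "tweet_analise").getD "")  -- KeyError excluded by Pre_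
  let positive : Int := labels.count "positive"
  let neutral : Int := labels.count "neutral"
  (positive, neutral, (labels.length : Int) - positive - neutral)

-- ===== PRECONDITION & SPEC =====
-- Pre_: every tweet dict has the key 'tweet_analise'; otherwise both Pythons raise KeyError.
def Pre_count_polarity (tweets : List (List (String × String))) : Prop :=
  ∀ t ∈ tweets, (PySem.Dict.mk t).contains "tweet_analise" = true
instance (tweets : List (List (String × String))) : Decidable (Pre_count_polarity tweets) := by unfold Pre_count_polarity; infer_instance
def pvWitness_count_polarity : (List (List (String × String))) :=
  [[("tweet_analise", "positive")], [("tweet_analise", "bad")], [("tweet_analise", "neutral")]]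
def Spec_count_polarity (tweets : List (List (String × String))) (out : Int × Int × Int) : Prop := out = count_polarity_alt tweets
instance (tweets : List (List (String × String))) (out : Int × Int × Int) : Decidable (Spec_count_polarity tweets out) := by unfold Spec_count_polarity; infer_instance

-- ===== CLAIM (what is proved, stated in full; the proofs are below) =====
def Claim_equal_count_polarity : Prop := ∀ (tweets : List (List (String × String))), Dom_count_polarity tweets → Pre_count_polarity tweets → Spec_count_polarity tweets (count_polarity tweets)

-- ===== LEMMAS AND PROOFS =====
def pvKeyf (t : List (String × String)) : String :=
  ((PySem.Dict.mk t).get? "tweet_analise").getD ""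

theorem pvGetSome (t : List (String × String))
    (h : (PySem.Dict.mk t).contains "tweet_analise" = true) :
    (PySem.Dict.mk t).get? "tweet_analise" = some (pvKeyf t) := by
  rw [PySem.Dict.contains_eq_isSome_get?] at h
  cases hg : (PySem.Dict.mk t).get? "tweet_analise" with
  | none => rw [hg] at h; simp at h
  | some v => simp [pvKeyf, hg]

theorem stepA (ks : List String) (p n g : Int) :
    ks.foldl (fun (acc : Int × Int × Int) k =>
      if k == "positive" then (acc.1 + 1, acc.2.1, acc.2.2)
      else if k == "neutral" then (acc.1, acc.2.1 + 1, acc.2.2)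
      else (acc.1, acc.2.1, acc.2.2 + 1)) (p, n, g)
    = (p + ks.count "positive", n + ks.count "neutral",
       g + (ks.length : Int) - ks.count "positive" - ks.count "neutral") := by
  induction ks generalizing p n g with
  | nil => simp
  | cons k ks ih =>
    simp only [beq_iff_eq] at ih ⊢
    simp only [List.foldl_cons]
    by_cases hp : k = "positive"
    · rw [if_pos hp, ih]
      subst hp
      simp [Prod.ext_iff]
      omega
    · by_cases hn : k = "neutral"
      · rw [if_neg hp, if_pos hn, ih]
        subst hn
        simp [Prod.ext_iff, hp]
        omega
      · rw [if_neg hp, if_neg hn, ih]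
        simp [Prod.ext_iff, hp, hn]
        omega

-- ===== VERDICT (by name: the statement is the Claim_ definition above) =====
theorem count_polarity_spec : Claim_equal_count_polarity := by
  intro tweets _ hpre
  unfold Spec_count_polarity count_polarity count_polarity_alt
  have hA : tweets.foldl (fun (acc : Int × Int × Int) t =>
      match (PySem.Dict.mk t).get? "tweet_analise" with
      | some v =>
        if v == "positive" then (acc.1 + 1, acc.2.1, acc.2.2)
        else if v == "neutral" then (acc.1, acc.2.1 + 1, acc.2.2)
        else (acc.1, acc.2.1, acc.2.2 + 1)
      | none => acc) ((0 : Int), (0 : Int), (0 : Int))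
      = (tweets.map pvKeyf).foldl (fun (acc : Int × Int × Int) k =>
          if k == "positive" then (acc.1 + 1, acc.2.1, acc.2.2)
          else if k == "neutral" then (acc.1, acc.2.1 + 1, acc.2.2)
          else (acc.1, acc.2.1, acc.2.2 + 1)) ((0 : Int), (0 : Int), (0 : Int)) := by
    rw [List.foldl_map]
    apply PySem.List.foldl_congr_mem
    intro acc t ht
    rw [pvGetSome t (hpre t ht)]
  rw [hA, stepA]
  unfold pvKeyf
  simp
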